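-- pv_equiv track=rewrite | github.com/jramaswami/Binary_Search_Python | bomber_man.py | solve
-- ===== SOURCE A (Python) =====
-- def solve(matrix):
--     def column(c):
--         "Generator yielding values in column c."
--         for row in matrix:
--             yield row[c]
--
--     row_sums = [sum(row) for row in matrix]
--     col_sums = [sum(column(c)) for c, _ in enumerate(matrix[0])]
--
--     soln = 0
--     for r, row in enumerate(matrix):
--         for c, _ in enumerate(row):
--             if row_sums[r] == 0 and col_sums[c] == 0:
--                 soln += 1
--     return soln
-- ===== SOURCE B (Python) =====
-- def solve(matrix):
--     row_sums = [sum(row) for row in matrix]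
--     col_sums = [sum(row[c] for row in matrix) for c in range(len(matrix[0]))]
--     zero_rows = sum(1 for s in row_sums if s == 0)
--     zero_cols = sum(1 for s in col_sums if s == 0)
--     return zero_rows * zero_cols
-- ===== Notes on version B (the rewrite author's own statement) =====
-- stated objective: simpler
-- what changed: Replaces A's nested double loop over all cells with two linear countings (zero row sums, zero col sums) and one multiplication, using the factorisation count = zero_rows * zero_cols valid on rectangular matrices.
import Mathlib
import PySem

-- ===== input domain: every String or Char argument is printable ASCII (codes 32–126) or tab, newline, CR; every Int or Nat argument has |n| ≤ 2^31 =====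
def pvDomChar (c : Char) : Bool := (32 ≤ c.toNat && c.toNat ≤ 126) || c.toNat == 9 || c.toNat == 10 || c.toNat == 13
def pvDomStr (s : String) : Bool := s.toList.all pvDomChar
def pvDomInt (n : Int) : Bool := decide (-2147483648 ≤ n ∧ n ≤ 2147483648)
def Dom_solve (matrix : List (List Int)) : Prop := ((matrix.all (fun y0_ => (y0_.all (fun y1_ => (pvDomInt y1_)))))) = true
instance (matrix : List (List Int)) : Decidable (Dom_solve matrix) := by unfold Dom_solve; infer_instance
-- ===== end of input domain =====

-- B replaces A's nested double loop over all cells by counting zero row sums and zero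
-- column sums and returning their product (objective: simpler).

-- ===== PORT A =====
def solve (matrix : List (List Int)) : Int :=
  let row_sums := matrix.map (fun row => row.sum)
  let col_sums := (PySem.List.enumerate (matrix.headD [])).map
      (fun p => (matrix.map (fun row => PySem.List.pyGetD row p.1 0)).sum)
  (PySem.List.enumerate matrix).foldl (fun soln p =>
    (PySem.List.enumerate p.2).foldl (fun s q =>
      if PySem.List.pyGetD row_sums p.1 1 = 0 ∧ PySem.List.pyGetD col_sums q.1 1 = 0
      then s + 1 else s) soln) 0

-- ===== PORT B =====
def solve_alt (matrix : List (List Int)) : Int :=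
  let row_sums := matrix.map (fun row => row.sum)
  let col_sums := (PySem.List.pyRange 0 ((matrix.headD []).length) 1).map
      (fun c => (matrix.map (fun row => PySem.List.pyGetD row c 0)).sum)
  let zero_rows : Int := row_sums.countP (fun s => s == 0)
  let zero_cols : Int := col_sums.countP (fun s => s == 0)
  zero_rows * zero_cols

-- ===== PRECONDITION & SPEC =====
-- Pre_ is exactly where A returns: it excludes the empty matrix (A raises IndexError on
-- matrix[0]), matrices with a row shorter than the first (A raises IndexError in the
-- column generator), and matrices with a zero-sum row longer than the first (A raises
-- IndexError on col_sums[c]); B also raises on the first two and A never returns on any.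
def Pre_solve (matrix : List (List Int)) : Prop :=
  matrix ≠ [] ∧ ∀ row ∈ matrix,
    (matrix.headD []).length ≤ row.length ∧
    (row.sum = 0 → row.length = (matrix.headD []).length)
instance (matrix : List (List Int)) : Decidable (Pre_solve matrix) := by
  unfold Pre_solve; infer_instance
def pvWitness_solve : List (List Int) := [[1, -1], [0, 0]]
def Spec_solve (matrix : List (List Int)) (out : Int) : Prop := out = solve_alt matrix
instance (matrix : List (List Int)) (out : Int) : Decidable (Spec_solve matrix out) := by unfold Spec_solve; infer_instance

-- ===== CLAIM (what is proved, stated in full; the proofs are below) =====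
def Claim_equal_solve : Prop := ∀ (matrix : List (List Int)), Dom_solve matrix → Pre_solve matrix → Spec_solve matrix (solve matrix)

-- ===== LEMMAS AND PROOFS =====

theorem countP_enum_fst {α : Type} (xs : List α) (p : Int → Bool) :
    (PySem.List.enumerate xs).countP (fun q => p q.1)
      = (PySem.List.pyRange 0 (xs.length : Int)).countP p := by
  conv_rhs => rw [← zero_add ((xs.length : Int)), ← PySem.List.map_fst_enumerate xs 0,
    List.countP_map]
  rfl

theorem countP_pyRange_getD (l : List Int) :
    (PySem.List.pyRange 0 (l.length : Int)).countP (fun c => decide (PySem.List.pyGetD l c 1 = 0))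
      = l.countP (fun s => s == 0) := by
  conv_rhs => rw [← PySem.List.map_pyGetD_pyRange_zero l 1, List.countP_map]
  apply List.countP_congr
  intro c _
  simp [Function.comp]

theorem solve_equal (matrix : List (List Int)) (hpre : Pre_solve matrix) :
    solve matrix = solve_alt matrix := by
  obtain ⟨hne, hrect⟩ := hpre
  unfold solve solve_alt
  simp only []
  set h := matrix.headD [] with hh
  set F : Int → Int := fun c => (matrix.map (fun row => PySem.List.pyGetD row c 0)).sum with hF
  set row_sums := matrix.map (fun row => row.sum) with hrs
  -- A's col_sums equals B's col_sums
  have hcols : (PySem.List.enumerate h).map (fun p => F p.1)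
      = (PySem.List.pyRange 0 (h.length : Int)).map F := by
    rw [show (fun p : Int × Int => F p.1) = F ∘ (fun p : Int × Int => p.1) from rfl,
      ← List.map_map, PySem.List.map_fst_enumerate, zero_add]
  rw [hcols]
  set col_sums := (PySem.List.pyRange 0 (h.length : Int)).map F with hcs
  have hcl : col_sums.length = h.length := by
    rw [hcs, List.length_map, PySem.List.length_pyRange_one]; omega
  set Z : Int := (col_sums.countP (fun s => s == 0) : Int) with hZ
  -- inner loop on each row collapses to one addition
  have hinner : ∀ (acc : Int), ∀ p ∈ PySem.List.enumerate matrix,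
      (PySem.List.enumerate p.2).foldl (fun s q =>
        if PySem.List.pyGetD row_sums p.1 1 = 0 ∧ PySem.List.pyGetD col_sums q.1 1 = 0
        then s + 1 else s) acc
      = acc + (if decide (PySem.List.pyGetD row_sums p.1 1 = 0) then Z else 0) := by
    intro acc p hp
    rw [PySem.List.foldl_ite_add_one]
    congr 1
    obtain ⟨k, hk, rfl⟩ := (PySem.List.mem_enumerate_iff matrix 0 p).1 hp
    by_cases hrc : PySem.List.pyGetD row_sums (0 + (k : Int)) 1 = 0
    · have hsum : matrix[k].sum = 0 := by
        have : PySem.List.pyGetD row_sums (0 + (k : Int)) 1 = matrix[k].sum := by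
          rw [zero_add, PySem.List.pyGetD_natCast, hrs]
          simp [List.getD_eq_getElem?_getD, hk]
        rw [this] at hrc; exact hrc
      have hlen : matrix[k].length = h.length := (hrect _ (by simp)).2 hsum
      simp only [hrc, decide_true, if_true, true_and]
      have := countP_enum_fst matrix[k] (fun c => decide (PySem.List.pyGetD col_sums c 1 = 0))
      rw [this, hlen, ← hcl, countP_pyRange_getD, hZ]
    · simp only [hrc, decide_false, false_and]
      simp
  rw [PySem.List.foldl_congr_mem _ _ _ _ hinner, PySem.List.foldl_add, zero_add]
  have : (PySem.List.enumerate matrix).map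
      (fun p => if decide (PySem.List.pyGetD row_sums p.1 1 = 0) then Z else 0)
      = (PySem.List.enumerate matrix).map
      (fun p => (if (fun q : Int × List Int => decide (PySem.List.pyGetD row_sums q.1 1 = 0)) p = true then (1:Int) else 0) * Z) := by
    apply List.map_congr_left
    intro p _
    by_cases hp : PySem.List.pyGetD row_sums p.1 1 = 0 <;> simp [hp]
  rw [this, List.sum_map_mul_right, PySem.List.sum_map_ite_one_zero]
  have hrl : row_sums.length = matrix.length := by rw [hrs, List.length_map]
  rw [countP_enum_fst matrix (fun c => decide (PySem.List.pyGetD row_sums c 1 = 0)),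
    ← hrl, countP_pyRange_getD]

-- ===== VERDICT (by name: the statement is the Claim_ definition above) =====
theorem solve_spec : Claim_equal_solve := by
  intro matrix _ hpre
  exact solve_equal matrix hpre
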